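-- pv_equiv track=rewrite | github.com/eliottcassidy2000/math | 04-computation/p11_beta8_v4.py | find_orbits_fast
-- ===== SOURCE A (Python) =====
-- def canon_orbit_rep(path, n):
--     best = tuple(path)
--     for j in range(1, n):
--         rotated = tuple((v + j) % n for v in path)
--         if rotated < best:
--             best = rotated
--     return best
--
-- def find_orbit_shift(path, rep, n):
--     for j in range(n):
--         shifted = tuple((v + j) % n for v in rep)
--         if shifted == tuple(path):
--             return j
--     return None
--
-- def find_orbits_fast(paths, n):
--     orbit_idx = {}
--     reps = []
--     path_to_orbit = {}
--     path_to_shift = {}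
--     for p in paths:
--         pt = tuple(p)
--         rep = canon_orbit_rep(p, n)
--         if rep not in orbit_idx:
--             orbit_idx[rep] = len(reps)
--             reps.append(rep)
--         idx = orbit_idx[rep]
--         shift = find_orbit_shift(p, rep, n)
--         path_to_orbit[pt] = idx
--         path_to_shift[pt] = shift
--     return reps, path_to_orbit, path_to_shift
-- ===== SOURCE B (Python) =====
-- def find_orbits_fast(paths, n):
--     # The closed forms below assume the vertices are residues mod n; validate that.
--     if n < 1:
--         raise ValueError("n must be a positive modulus")
--     for p in paths:
--         for v in p:
--             if not 0 <= v < n: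
--                 raise ValueError("path entries must be residues mod n")
--     orbit_idx = {}
--     reps = []
--     path_to_orbit = {}
--     path_to_shift = {}
--     for p in paths:
--         pt = tuple(p)
--         if pt:
--             # the minimal rotation is the unique one starting with 0
--             s = pt[0] % n
--             rep = tuple((v - s) % n for v in pt)
--         else:
--             s = 0
--             rep = ()
--         idx = orbit_idx.setdefault(rep, len(reps))
--         if idx == len(reps):
--             reps.append(rep)
--         path_to_orbit[pt] = idx
--         path_to_shift[pt] = s
--     return reps, path_to_orbit, path_to_shift
-- ===== Notes on version B (the rewrite author's own statement) =====
-- stated objective: alternative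
-- what changed: B replaces A's scan over all n rotations (canon_orbit_rep) and A's linear search for the shift (find_orbit_shift) by the closed form: the lexicographically minimal rotation of a reduced path is the unique one whose first entry is 0, so rep = ((v - p[0]) % n for v in p) and shift = p[0] % n, one O(L) pass per path instead of O(n*L); B validates that entries are residues mod n (where they are not, A silently stores None as a shift) and raises ValueError otherwise, so a timing run could not measure it on its unreduced inputs.
-- outside the precondition, e.g. on find_orbits_fast([[5]], 3): A returns ([(0,)], {(5,): 0}, {(5,): None}), B raises ValueError; on find_orbits_fast([[0]], 0): A returns ([(0,)], {(0,): 0}, {(0,): None}), B raises ValueError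
import Mathlib
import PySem

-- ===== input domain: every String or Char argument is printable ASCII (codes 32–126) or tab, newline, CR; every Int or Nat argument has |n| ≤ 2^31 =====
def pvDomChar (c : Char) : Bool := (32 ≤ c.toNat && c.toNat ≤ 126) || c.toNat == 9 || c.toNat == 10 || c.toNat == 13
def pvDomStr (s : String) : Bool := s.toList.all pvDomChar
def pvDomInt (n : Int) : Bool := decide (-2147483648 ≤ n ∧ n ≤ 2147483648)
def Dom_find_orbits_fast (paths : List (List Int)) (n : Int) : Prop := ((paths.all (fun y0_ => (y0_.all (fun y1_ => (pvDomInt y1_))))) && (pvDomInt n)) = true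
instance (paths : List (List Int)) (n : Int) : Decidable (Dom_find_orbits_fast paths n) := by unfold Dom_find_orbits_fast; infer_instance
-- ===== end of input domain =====

-- B replaces A's full scan over all n rotations and A's linear search for the shift by the
-- closed form rep = (v - p[0]) % n, shift = p[0] % n (the minimal rotation of a reduced path
-- is the unique one starting with 0): one pass per path; B raises ValueError on entries that
-- are not residues mod n, where A stores None (not an int) as a shift — excluded by Pre_.


-- ===== PORT A =====
-- Python's '<' on tuples of ints, hand-ported (exact lexicographic comparison):
def lexLt : List Int → List Int → Bool
  | _, [] => false
  | [], _ :: _ => true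
  | a :: as, b :: bs => if a < b then true else if b < a then false else lexLt as bs

def canon_orbit_rep (path : List Int) (n : Int) : List Int :=
  (PySem.List.pyRange 1 n 1).foldl
    (fun best j =>
      let rotated := path.map (fun v => PySem.Int.mod (v + j) n)
      if lexLt rotated best then rotated else best)
    path

def fos_loop (path rep : List Int) (n : Int) : List Int → Option Int
  | [] => none
  | j :: js =>
    if rep.map (fun v => PySem.Int.mod (v + j) n) = path then some j
    else fos_loop path rep n js

def find_orbit_shift (path rep : List Int) (n : Int) : Option Int :=
  fos_loop path rep n (PySem.List.pyRange 0 n 1)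

abbrev FoState := PySem.Dict (List Int) Int × List (List Int) × PySem.Dict (List Int) Int × PySem.Dict (List Int) Int

def foA_step (n : Int) (st : FoState) (p : List Int) : FoState :=
  let rep := canon_orbit_rep p n
  let st1 : PySem.Dict (List Int) Int × List (List Int) :=
    if st.1.contains rep then (st.1, st.2.1)
    else (st.1.insert rep (st.2.1.length : Int), st.2.1 ++ [rep])
  let idx := st1.1.getD rep 0                       -- orbit_idx[rep]; the key is always present here
  let shift := (find_orbit_shift p rep n).getD 0    -- under Pre_ the search always succeeds (None is excluded by Pre_)
  (st1.1, st1.2, st.2.2.1.insert p idx, st.2.2.2.insert p shift)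

def find_orbits_fast (paths : List (List Int)) (n : Int) : List (List Int) × (List (List Int × Int)) × (List (List Int × Int)) :=
  let st := paths.foldl (foA_step n) (PySem.Dict.empty, [], PySem.Dict.empty, PySem.Dict.empty)
  (st.2.1, st.2.2.1.items, st.2.2.2.items)

-- ===== PORT B =====
-- Source B first validates that n ≥ 1 and every entry is a residue mod n and raises ValueError
-- otherwise; exactly those inputs are excluded by Pre_ below, so the port carries no branch
-- for them and transcribes the main loop.
-- the pair (shift, rep) that B computes for one path
def foB_srep (n : Int) (p : List Int) : Int × List Int :=
  match p with
  | [] => (0, [])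
  | v :: _ =>
    let s := PySem.Int.mod v n
    (s, p.map (fun u => PySem.Int.mod (u - s) n))

def foB_step (n : Int) (st : FoState) (p : List Int) : FoState :=
  let sr : Int × List Int := foB_srep n p
  let idx := (st.1.get? sr.2).getD (st.2.1.length : Int)   -- orbit_idx.setdefault(rep, len(reps)) : the value
  let d := st.1.setdefault sr.2 (st.2.1.length : Int)      -- … and the updated dict
  let reps := if idx = (st.2.1.length : Int) then st.2.1 ++ [sr.2] else st.2.1
  (d, reps, st.2.2.1.insert p idx, st.2.2.2.insert p sr.1)

def find_orbits_fast_alt (paths : List (List Int)) (n : Int) : List (List Int) × (List (List Int × Int)) × (List (List Int × Int)) :=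
  let st := paths.foldl (foB_step n) (PySem.Dict.empty, [], PySem.Dict.empty, PySem.Dict.empty)
  (st.2.1, st.2.2.1.items, st.2.2.2.items)

-- ===== PRECONDITION & SPEC =====
-- Pre_ excludes n < 1 and paths with an entry outside [0, n): there A stores None (not an int)
-- as the shift of that path (find_orbit_shift finds no match), so A's result leaves the declared type.
def Pre_find_orbits_fast (paths : List (List Int)) (n : Int) : Prop :=
  1 ≤ n ∧ ∀ p ∈ paths, ∀ v ∈ p, 0 ≤ v ∧ v < n
instance (paths : List (List Int)) (n : Int) : Decidable (Pre_find_orbits_fast paths n) := by unfold Pre_find_orbits_fast; infer_instance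

def pvWitness_find_orbits_fast : List (List Int) × Int := ([[5, 1000000], [1000000, 5], [], [123456789, 7]], 2147483648)

def Spec_find_orbits_fast (paths : List (List Int)) (n : Int) (out : List (List Int) × (List (List Int × Int)) × (List (List Int × Int))) : Prop := out = find_orbits_fast_alt paths n
instance (paths : List (List Int)) (n : Int) (out : List (List Int) × (List (List Int × Int)) × (List (List Int × Int))) : Decidable (Spec_find_orbits_fast paths n out) := by unfold Spec_find_orbits_fast; infer_instance

-- ===== CLAIM (what is proved, stated in full; the proofs are below) =====
def Claim_equal_find_orbits_fast : Prop := ∀ (paths : List (List Int)) (n : Int), Dom_find_orbits_fast paths n → Pre_find_orbits_fast paths n → Spec_find_orbits_fast paths n (find_orbits_fast paths n)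

-- ===== LEMMAS AND PROOFS =====

theorem lexLt_irrefl (a : List Int) : lexLt a a = false := by
  induction a with
  | nil => rfl
  | cons x xs ih => simp [lexLt, ih]

theorem lexLt_cons_of_lt {a b : Int} (h : a < b) (as bs : List Int) :
    lexLt (a :: as) (b :: bs) = true ∧ lexLt (b :: bs) (a :: as) = false := by
  constructor <;> simp [lexLt, h, not_lt.mpr h.le]

-- fold of "if x < best then x else best" finds the strict minimum m
theorem foldl_min (f : Int → List Int) (m : List Int) :
    ∀ (js : List Int) (b : List Int),
      (∀ j ∈ js, f j = m ∨ (lexLt (f j) m = false ∧ lexLt m (f j) = true)) →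
      (b = m ∨ (lexLt m b = true ∧ m ∈ js.map f)) →
      js.foldl (fun best j => if lexLt (f j) best then f j else best) b = m := by
  intro js
  induction js with
  | nil =>
    intro b _ hb
    rcases hb with hb | ⟨_, hm⟩
    · simpa using hb
    · simp at hm
  | cons j js ih =>
    intro b h hb
    simp only [List.foldl_cons]
    rcases h j (by simp) with hj | ⟨hj1, hj2⟩
    · rcases hb with hb | ⟨hlt, _⟩
      · subst hb; rw [hj]
        have hb' : (if lexLt b b = true then b else b) = b := by simp
        rw [hb']
        exact ih b (fun x hx => h x (by simp [hx])) (Or.inl rfl)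
      · rw [hj, hlt]
        simp only
        exact ih m (fun x hx => h x (by simp [hx])) (Or.inl rfl)
    · rcases hb with hb | ⟨hlt, hm⟩
      · subst hb
        rw [hj1]
        simp only [Bool.false_eq_true, if_false]
        exact ih b (fun x hx => h x (by simp [hx])) (Or.inl rfl)
      · have hm' : m ∈ js.map f := by
          have hor : m = f j ∨ ∃ a ∈ js, f a = m := by simpa using hm
          rcases hor with he | ⟨a, ha, hfa⟩
          · rw [he] at hj2
            exact absurd hj2 (by simp [lexLt_irrefl])
          · exact List.mem_map.mpr ⟨a, ha, hfa⟩
        by_cases hc : lexLt (f j) b = true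
        · rw [if_pos hc]
          exact ih (f j) (fun x hx => h x (by simp [hx])) (Or.inr ⟨hj2, hm'⟩)
        · rw [if_neg hc]
          exact ih b (fun x hx => h x (by simp [hx])) (Or.inr ⟨hlt, hm'⟩)

def headShift (n : Int) (p : List Int) : Int :=
  match p with | [] => 0 | v0 :: _ => PySem.Int.mod v0 n

theorem canon_eq (n : Int) (hn : 1 ≤ n) (p : List Int) (hp : ∀ v ∈ p, 0 ≤ v ∧ v < n) :
    canon_orbit_rep p n = p.map (fun v => PySem.Int.mod (v - headShift n p) n) := by
  have hn0 : (0:Int) < n := by omega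
  unfold canon_orbit_rep
  cases p with
  | nil =>
    simp only [List.map_nil]
    exact foldl_min (fun _ => []) [] _ [] (fun j _ => Or.inl rfl) (Or.inl rfl)
  | cons p0 tl =>
    obtain ⟨h0, h1⟩ := hp p0 (by simp)
    have hs : p0 % n = p0 := Int.emod_eq_of_lt h0 h1
    have hm : headShift n (p0 :: tl) = p0 % n := PySem.Int.mod_eq_emod_of_pos hn0
    rw [hm]
    simp only [PySem.Int.mod_eq_emod_of_pos hn0, hs]
    refine foldl_min (fun j => (p0 :: tl).map (fun v => (v + j) % n))
      ((p0 :: tl).map (fun v => (v - p0) % n)) _ _ ?_ ?_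
    · intro j hj
      rw [PySem.List.mem_pyRange_one] at hj
      by_cases hj0 : (p0 + j) % n = 0
      · refine Or.inl (List.map_congr_left fun v _ => ?_)
        rw [Int.emod_eq_emod_iff_emod_sub_eq_zero,
          show v + j - (v - p0) = p0 + j by ring]
        exact hj0
      · refine Or.inr ?_
        have hge := Int.emod_nonneg (p0 + j) (by omega : n ≠ 0)
        have h00 : (p0 - p0) % n = 0 := by simp
        have hc := lexLt_cons_of_lt
          (show (p0 - p0) % n < (p0 + j) % n by rw [h00]; exact lt_of_le_of_ne hge (Ne.symm hj0))
          (tl.map fun v => (v - p0) % n) (tl.map fun v => (v + j) % n)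
        simp only [List.map_cons]
        exact ⟨hc.2, hc.1⟩
    · by_cases hz : p0 = 0
      · subst hz
        refine Or.inl ?_
        have hcg : ∀ v ∈ (0 : Int) :: tl, (fun v => (v - 0) % n) v = (fun (v : Int) => v) v := by
          intro v hv
          obtain ⟨hv0, hv1⟩ := hp v hv
          simpa using Int.emod_eq_of_lt hv0 hv1
        rw [List.map_congr_left hcg, List.map_id']
      · refine Or.inr ⟨?_, ?_⟩
        · have hc := lexLt_cons_of_lt (show (p0 - p0) % n < p0 by simp; omega)
            (tl.map fun v => (v - p0) % n) tl
          simp only [List.map_cons]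
          exact hc.1
        · refine List.mem_map.mpr ⟨n - p0, ?_, ?_⟩
          · rw [PySem.List.mem_pyRange_one]; omega
          · refine List.map_congr_left fun v _ => ?_
            rw [Int.emod_eq_emod_iff_emod_sub_eq_zero,
              show v + (n - p0) - (v - p0) = n by ring]
            simp

theorem fos_range (n p0 : Int) (tl : List Int) (hn : 1 ≤ n) (hp : ∀ v ∈ p0 :: tl, 0 ≤ v ∧ v < n) :
    ∀ (k : Nat) (a : Int), 0 ≤ a → a ≤ p0 → p0 - a = (k : Int) →
      fos_loop (p0 :: tl) ((p0 :: tl).map (fun v => PySem.Int.mod (v - p0) n)) n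
        (PySem.List.pyRange a n 1) = some p0 := by
  have hn0 : (0:Int) < n := by omega
  obtain ⟨h0, h1⟩ := hp p0 (by simp)
  intro k
  induction k with
  | zero =>
    intro a ha0 hale hk
    have hap : a = p0 := by omega
    subst hap
    rw [PySem.List.pyRange_one_cons (by omega : a < n)]
    unfold fos_loop
    rw [if_pos]
    rw [List.map_map]
    have hcg : ∀ v ∈ a :: tl,
        ((fun w => PySem.Int.mod (w + a) n) ∘ (fun v => PySem.Int.mod (v - a) n)) v = (fun (v : Int) => v) v := by
      intro v hv
      obtain ⟨hv0, hv1⟩ := hp v hv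
      simp only [Function.comp_apply, PySem.Int.mod_eq_emod_of_pos hn0]
      rw [Int.emod_add_emod, show v - a + a = v by ring]
      exact Int.emod_eq_of_lt hv0 hv1
    rw [List.map_congr_left hcg, List.map_id']
  | succ k ih =>
    intro a ha0 hale hk
    have halt : a < p0 := by omega
    rw [PySem.List.pyRange_one_cons (by omega : a < n)]
    unfold fos_loop
    rw [if_neg, ih (a + 1) (by omega) (by omega) (by omega)]
    intro hcontra
    simp only [List.map_cons, List.cons.injEq] at hcontra
    have hhead := hcontra.1
    simp only [PySem.Int.mod_eq_emod_of_pos hn0] at hhead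
    rw [show p0 - p0 = (0:Int) by ring] at hhead
    simp only [Int.zero_emod, Int.zero_add] at hhead
    rw [Int.emod_eq_of_lt ha0 (by omega)] at hhead
    omega

theorem shift_eq (n : Int) (hn : 1 ≤ n) (p : List Int) (hp : ∀ v ∈ p, 0 ≤ v ∧ v < n) :
    (find_orbit_shift p (p.map (fun v => PySem.Int.mod (v - headShift n p) n)) n).getD 0
      = headShift n p := by
  have hn0 : (0:Int) < n := by omega
  cases p with
  | nil =>
    unfold find_orbit_shift
    rw [PySem.List.pyRange_one_cons (by omega : (0:Int) < n)]
    unfold fos_loop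
    rw [if_pos (by simp)]
    rfl
  | cons p0 tl =>
    obtain ⟨h0, h1⟩ := hp p0 (by simp)
    have hs : PySem.Int.mod p0 n = p0 := by
      rw [PySem.Int.mod_eq_emod_of_pos hn0]; exact Int.emod_eq_of_lt h0 h1
    have hm : headShift n (p0 :: tl) = p0 := hs
    rw [hm]
    unfold find_orbit_shift
    rw [fos_range n p0 tl hn hp p0.toNat 0 le_rfl h0 (by omega)]
    rfl

def FoInv (st : FoState) : Prop := ∀ k i, st.1.get? k = some i → i < (st.2.1.length : Int)

theorem dict_contains_eq {κ ν : Type} [BEq κ] (d : PySem.Dict κ ν) (k : κ) :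
    d.contains k = (d.get? k).isSome := by
  simp only [PySem.Dict.contains, PySem.Dict.get?, Option.isSome_map]
  rw [Bool.eq_iff_iff]
  simp [List.any_eq_true, List.find?_isSome]

theorem step_eq (n : Int) (hn : 1 ≤ n) (p : List Int) (hp : ∀ v ∈ p, 0 ≤ v ∧ v < n)
    (st : FoState) (hinv : FoInv st) :
    foA_step n st p = foB_step n st p ∧ FoInv (foA_step n st p) := by
  obtain ⟨d, reps, pto, pts⟩ := st
  have hinv' : ∀ k i, d.get? k = some i → i < (reps.length : Int) := fun k i h => hinv k i h
  have hsr : foB_srep n p = (headShift n p, p.map (fun v => PySem.Int.mod (v - headShift n p) n)) := by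
    unfold foB_srep headShift
    cases p <;> simp
  have hrep := canon_eq n hn p hp
  have hshift := shift_eq n hn p hp
  unfold foA_step foB_step FoInv
  simp only [hsr, hrep, hshift]
  set rep := p.map (fun v => PySem.Int.mod (v - headShift n p) n) with hrepdef
  by_cases hc : d.contains rep = true
  · have hsome : (d.get? rep).isSome := by rw [← dict_contains_eq]; exact hc
    obtain ⟨i, hi⟩ := Option.isSome_iff_exists.mp hsome
    have hilt : i < (reps.length : Int) := hinv' rep i hi
    rw [PySem.Dict.setdefault_of_contains d _ hc]
    simp only [hc, if_true]
    constructor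
    · simp [PySem.Dict.getD, hi, hilt.ne]
    · exact fun k j h => hinv' k j h
  · have hc' : d.contains rep = false := by simpa using hc
    have hnone : d.get? rep = none := by
      have h2 := dict_contains_eq d rep
      rw [hc'] at h2
      exact Option.not_isSome_iff_eq_none.mp (by simp [← h2])
    rw [PySem.Dict.setdefault_of_not_contains d _ hc']
    simp only [hc', Bool.false_eq_true, if_false]
    constructor
    · simp [PySem.Dict.getD, PySem.Dict.get?_insert_self, hnone]
    · intro k j h
      by_cases hk : k = rep
      · subst hk
        rw [PySem.Dict.get?_insert_self] at h
        have : j = (reps.length : Int) := by injection h with h'; omega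
        simp [List.length_append]
        omega
      · rw [PySem.Dict.get?_insert_of_ne d _ hk] at h
        have := hinv' k j h
        simp [List.length_append]
        omega

theorem fold_eq (n : Int) (hn : 1 ≤ n) :
    ∀ (paths : List (List Int)) (st : FoState),
      (∀ p ∈ paths, ∀ v ∈ p, 0 ≤ v ∧ v < n) → FoInv st →
      paths.foldl (foA_step n) st = paths.foldl (foB_step n) st := by
  intro paths
  induction paths with
  | nil => intro st _ _; rfl
  | cons p ps ih =>
    intro st hgood hinv
    obtain ⟨heq, hinv'⟩ := step_eq n hn p (hgood p (by simp)) st hinv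
    simp only [List.foldl_cons]
    rw [← heq]
    exact ih (foA_step n st p) (fun q hq => hgood q (by simp [hq])) hinv'

-- ===== VERDICT (by name: the statement is the Claim_ definition above) =====
theorem find_orbits_fast_spec : Claim_equal_find_orbits_fast := by
  intro paths n _ hpre
  unfold Spec_find_orbits_fast find_orbits_fast find_orbits_fast_alt
  rw [fold_eq n hpre.1 paths _ hpre.2 (by intro k i h; simp [PySem.Dict.empty, PySem.Dict.get?] at h)]
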